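-- pv_equiv track=rewrite | github.com/deecamp2019-group20/CNN_PokerNet | data/DataLoader.py | is_quadr2double
-- ===== SOURCE A (Python) =====
-- def is_quadr2double(card_list):
--     # index start from 1
--     cards_rank_simple = [
--         '3', '4', '5', '6', '7', '8', '9', '10',
--         'J', 'Q', 'K', 'A', '2'
--     ]
--     # NOTE: double could not choose from 'X' and 'D'
--     if len(card_list) != 8:
--         return -1, False
--     else:
--         if (
--             card_list[0] == card_list[1] == card_list[2] == card_list[3] and
--             card_list[4] == card_list[5] and
--             card_list[0] != card_list[4] and
--             card_list[6] == card_list[7] and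
--                 card_list[0] != card_list[6]):
--             main_group_num = card_list[0]
--             kicker_num_1 = card_list[6]
--             kicker_num_2 = card_list[4]
--             # calculate index
--             index = cards_rank_simple.index(main_group_num) * 66
--             for i in range(0, cards_rank_simple.index(kicker_num_1)):
--                 index += (11 - i)
--             index += (
--                 cards_rank_simple.index(kicker_num_2) -
--                 cards_rank_simple.index(kicker_num_1)
--             )
--             return index, True
--
--         elif (
--             card_list[2] == card_list[3] == card_list[4] == card_list[5] and
--             card_list[0] == card_list[1] and
--             card_list[0] != card_list[2] and
--             card_list[6] == card_list[7] and
--             card_list[6] != card_list[2] and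
--                 card_list[0] != card_list[6]):
--             main_group_num = card_list[2]
--             kicker_num_1 = card_list[6]
--             kicker_num_2 = card_list[0]
--             # calculate index
--             index = cards_rank_simple.index(main_group_num) * 66
--             for i in range(0, cards_rank_simple.index(kicker_num_1)):
--                 index += (11 - i)
--             index += (
--                 cards_rank_simple.index(kicker_num_2) -
--                 cards_rank_simple.index(kicker_num_1) - 1
--             )
--             return index, True
--
--         elif (
--             card_list[4] == card_list[5] == card_list[6] == card_list[7] and
--             card_list[0] == card_list[1] and
--             card_list[0] != card_list[4] and
--             card_list[2] == card_list[3] and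
--             card_list[2] != card_list[4] and
--                 card_list[0] != card_list[2]):
--             main_group_num = card_list[4]
--             kicker_num_1 = card_list[2]
--             kicker_num_2 = card_list[0]
--             # calculate index
--             index = cards_rank_simple.index(main_group_num) * 66
--             for i in range(0, cards_rank_simple.index(kicker_num_1)):
--                 if i < cards_rank_simple.index(main_group_num):
--                     index += (11 - i)
--                 elif i == cards_rank_simple.index(main_group_num):
--                     pass
--                 else:
--                     index += (12 - i)
--             index += (
--                 cards_rank_simple.index(kicker_num_2) -
--                 cards_rank_simple.index(kicker_num_1)
--             )
--             return index, True
--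
--         else:
--             return -1, False
-- ===== SOURCE B (Python) =====
-- _RANKS = ['3', '4', '5', '6', '7', '8', '9', '10', 'J', 'Q', 'K', 'A', '2']
-- _RANK = {c: i for i, c in enumerate(_RANKS)}
--
--
-- def is_quadr2double(card_list):
--     # index start from 1
--     if len(card_list) != 8:
--         return -1, False
--     a, b, c, d, e, f, g, h = card_list
--     if a == b == c == d and e == f and a != e and g == h and a != g:
--         m, k1, k2, adj = a, g, e, 0
--     elif c == d == e == f and a == b and a != c and g == h and g != c and a != g:
--         m, k1, k2, adj = c, g, a, -1
--     elif e == f == g == h and a == b and a != e and c == d and c != e and a != c: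
--         mi, r1 = _RANK[e], _RANK[c]
--         s = 11 * r1 - r1 * (r1 - 1) // 2
--         if mi < r1:
--             s += (r1 - 1 - mi) - (11 - mi)
--         return mi * 66 + s + _RANK[a] - r1, True
--     else:
--         return -1, False
--     r1 = _RANK[k1]
--     return _RANK[m] * 66 + 11 * r1 - r1 * (r1 - 1) // 2 + _RANK[k2] - r1 + adj, True
-- ===== Notes on version B (the rewrite author's own statement) =====
-- stated objective: simpler
-- what changed: Each index-summation loop (the plain 11-i loop in branches 1-2 and the conditional skip/shift loop in branch 3) is replaced by a closed-form triangular-sum expression, and rank positions come from a dict built once instead of repeated list.index scans.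
import Mathlib
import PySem

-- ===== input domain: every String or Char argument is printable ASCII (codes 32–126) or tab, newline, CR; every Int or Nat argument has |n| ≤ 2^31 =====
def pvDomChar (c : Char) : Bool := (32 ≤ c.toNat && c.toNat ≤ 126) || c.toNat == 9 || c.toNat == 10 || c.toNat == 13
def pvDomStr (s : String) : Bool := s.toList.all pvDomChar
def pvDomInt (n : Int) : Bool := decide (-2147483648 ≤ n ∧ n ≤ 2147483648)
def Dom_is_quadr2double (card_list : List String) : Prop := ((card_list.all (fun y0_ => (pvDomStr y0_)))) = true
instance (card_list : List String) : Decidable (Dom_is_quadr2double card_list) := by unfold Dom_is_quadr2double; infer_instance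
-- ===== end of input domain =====

-- B replaces each index-summation loop with a closed-form triangular-sum expression
-- and a dict for rank lookup (objective: simpler; same asymptotic cost on 8-card input).

-- ===== PORT A =====
def cardsRankSimple : List String :=
  ["3", "4", "5", "6", "7", "8", "9", "10", "J", "Q", "K", "A", "2"]

def is_quadr2double (card_list : List String) : Int × Bool :=
  match card_list with
  | [c0, c1, c2, c3, c4, c5, c6, c7] =>
    if c0 = c1 ∧ c1 = c2 ∧ c2 = c3 ∧ c4 = c5 ∧ c0 ≠ c4 ∧ c6 = c7 ∧ c0 ≠ c6 then
      -- .index raises ValueError on a card not in the rank list: none here, excluded by Pre_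
      match PySem.List.index? cardsRankSimple c0, PySem.List.index? cardsRankSimple c6,
            PySem.List.index? cardsRankSimple c4 with
      | some im, some i1, some i2 =>
          let index : Int := (im : Int) * 66
          let index := (PySem.List.pyRange 0 (i1 : Int) 1).foldl
            (fun acc i => acc + (11 - i)) index
          (index + ((i2 : Int) - (i1 : Int)), true)
      | _, _, _ => (-1, false)
    else if c2 = c3 ∧ c3 = c4 ∧ c4 = c5 ∧ c0 = c1 ∧ c0 ≠ c2 ∧ c6 = c7 ∧ c6 ≠ c2 ∧ c0 ≠ c6 then
      match PySem.List.index? cardsRankSimple c2, PySem.List.index? cardsRankSimple c6,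
            PySem.List.index? cardsRankSimple c0 with
      | some im, some i1, some i2 =>
          let index : Int := (im : Int) * 66
          let index := (PySem.List.pyRange 0 (i1 : Int) 1).foldl
            (fun acc i => acc + (11 - i)) index
          (index + ((i2 : Int) - (i1 : Int) - 1), true)
      | _, _, _ => (-1, false)
    else if c4 = c5 ∧ c5 = c6 ∧ c6 = c7 ∧ c0 = c1 ∧ c0 ≠ c4 ∧ c2 = c3 ∧ c2 ≠ c4 ∧ c0 ≠ c2 then
      match PySem.List.index? cardsRankSimple c4, PySem.List.index? cardsRankSimple c2,
            PySem.List.index? cardsRankSimple c0 with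
      | some im, some i1, some i2 =>
          let index : Int := (im : Int) * 66
          let index := (PySem.List.pyRange 0 (i1 : Int) 1).foldl
            (fun acc i =>
              if i < (im : Int) then acc + (11 - i)
              else if i = (im : Int) then acc
              else acc + (12 - i)) index
          (index + ((i2 : Int) - (i1 : Int)), true)
      | _, _, _ => (-1, false)
    else (-1, false)
  | _ => (-1, false)

-- ===== PORT B =====
-- _RANKS
def ranksB : List String :=
  ["3", "4", "5", "6", "7", "8", "9", "10", "J", "Q", "K", "A", "2"]

-- _RANK = {c: i for i, c in enumerate(_RANKS)}
def rankDict : PySem.Dict String Int :=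
  (PySem.List.enumerate ranksB 0).foldl
    (fun d p => d.insert p.2 p.1) PySem.Dict.empty

-- shared tail of Source B's first two branches; dict lookup raises KeyError (none) on non-rank cards
def quadTail (m k1 k2 : String) (adj : Int) : Int × Bool :=
  match PySem.Dict.get? rankDict m with
  | none => (-1, false)
  | some rm =>
    match PySem.Dict.get? rankDict k1 with
    | none => (-1, false)
    | some r1 =>
      match PySem.Dict.get? rankDict k2 with
      | none => (-1, false)
      | some r2 =>
        (rm * 66 + 11 * r1 - PySem.Int.floordiv (r1 * (r1 - 1)) 2 + r2 - r1 + adj, true)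

def is_quadr2double_alt (card_list : List String) : Int × Bool :=
  if card_list.length ≠ 8 then (-1, false)
  else
    let a := card_list.getD 0 ""
    let b := card_list.getD 1 ""
    let c := card_list.getD 2 ""
    let d := card_list.getD 3 ""
    let e := card_list.getD 4 ""
    let f := card_list.getD 5 ""
    let g := card_list.getD 6 ""
    let h := card_list.getD 7 ""
    if a = b ∧ b = c ∧ c = d ∧ e = f ∧ a ≠ e ∧ g = h ∧ a ≠ g then
      quadTail a g e 0
    else if c = d ∧ d = e ∧ e = f ∧ a = b ∧ a ≠ c ∧ g = h ∧ g ≠ c ∧ a ≠ g then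
      quadTail c g a (-1)
    else if e = f ∧ f = g ∧ g = h ∧ a = b ∧ a ≠ e ∧ c = d ∧ c ≠ e ∧ a ≠ c then
      match PySem.Dict.get? rankDict e with
      | none => (-1, false)
      | some mi =>
        match PySem.Dict.get? rankDict c with
        | none => (-1, false)
        | some r1 =>
          match PySem.Dict.get? rankDict a with
          | none => (-1, false)
          | some ra =>
            let s := 11 * r1 - PySem.Int.floordiv (r1 * (r1 - 1)) 2
            let s := if mi < r1 then s + ((r1 - 1 - mi) - (11 - mi)) else s
            (mi * 66 + s + ra - r1, true)
    else (-1, false)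

-- ===== PRECONDITION & SPEC =====
-- Boolean guard used by Pre_: whichever quad+two-pairs branch matches, its three looked-up cards are ranks.
def ranksPre : List String :=
  ["3", "4", "5", "6", "7", "8", "9", "10", "J", "Q", "K", "A", "2"]

def preOk (cl : List String) : Bool :=
  (!(cl.getD 0 "" == cl.getD 1 "" && cl.getD 1 "" == cl.getD 2 "" && cl.getD 2 "" == cl.getD 3 "" &&
     cl.getD 4 "" == cl.getD 5 "" && !(cl.getD 0 "" == cl.getD 4 "") && cl.getD 6 "" == cl.getD 7 "" &&
     !(cl.getD 0 "" == cl.getD 6 "")) ||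
    (ranksPre.contains (cl.getD 0 "") && ranksPre.contains (cl.getD 6 "") &&
     ranksPre.contains (cl.getD 4 ""))) &&
  (!(cl.getD 2 "" == cl.getD 3 "" && cl.getD 3 "" == cl.getD 4 "" && cl.getD 4 "" == cl.getD 5 "" &&
     cl.getD 0 "" == cl.getD 1 "" && !(cl.getD 0 "" == cl.getD 2 "") && cl.getD 6 "" == cl.getD 7 "" &&
     !(cl.getD 6 "" == cl.getD 2 "") && !(cl.getD 0 "" == cl.getD 6 "")) ||
    (ranksPre.contains (cl.getD 2 "") && ranksPre.contains (cl.getD 6 "") &&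
     ranksPre.contains (cl.getD 0 ""))) &&
  (!(cl.getD 4 "" == cl.getD 5 "" && cl.getD 5 "" == cl.getD 6 "" && cl.getD 6 "" == cl.getD 7 "" &&
     cl.getD 0 "" == cl.getD 1 "" && !(cl.getD 0 "" == cl.getD 4 "") && cl.getD 2 "" == cl.getD 3 "" &&
     !(cl.getD 2 "" == cl.getD 4 "") && !(cl.getD 0 "" == cl.getD 2 "")) ||
    (ranksPre.contains (cl.getD 4 "") && ranksPre.contains (cl.getD 2 "") &&
     ranksPre.contains (cl.getD 0 "")))

-- Pre_ excludes exactly the inputs where Python A raises ValueError: a hand matching one of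
-- the three quad+two-pairs shapes whose looked-up cards are not all in the 13-rank list
-- (B raises KeyError on those same inputs).
def Pre_is_quadr2double (card_list : List String) : Prop :=
  card_list.length = 8 → preOk card_list = true

instance (card_list : List String) : Decidable (Pre_is_quadr2double card_list) := by
  unfold Pre_is_quadr2double; infer_instance

def pvWitness_is_quadr2double : List String := ["3", "3", "3", "3", "4", "4", "5", "5"]

def Spec_is_quadr2double (card_list : List String) (out : Int × Bool) : Prop := out = is_quadr2double_alt card_list
instance (card_list : List String) (out : Int × Bool) : Decidable (Spec_is_quadr2double card_list out) := by unfold Spec_is_quadr2double; infer_instance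

-- ===== CLAIM (what is proved, stated in full; the proofs are below) =====
def Claim_equal_is_quadr2double : Prop := ∀ (card_list : List String), Dom_is_quadr2double card_list → Pre_is_quadr2double card_list → Spec_is_quadr2double card_list (is_quadr2double card_list)

-- ===== LEMMAS AND PROOFS =====

-- every card of the rank list has the same position under A's list .index and B's dict
lemma rank_lookup : ∀ s ∈ ranksPre, ∃ r : Fin 13,
    PySem.List.index? cardsRankSimple s = some (r : Nat) ∧
    PySem.Dict.get? rankDict s = some ((r : Nat) : Int) := by decide

-- closed form of A's plain summation loop (branches 1 and 2)
lemma sum_plain : ∀ r : Fin 13,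
    ((PySem.List.pyRange 0 ((r : Nat) : Int) 1).map (fun i => (11 : Int) - i)).sum =
      11 * ((r : Nat) : Int) -
        PySem.Int.floordiv (((r : Nat) : Int) * (((r : Nat) : Int) - 1)) 2 := by decide

-- closed form of A's conditional summation loop (branch 3)
lemma sum_cond : ∀ mi r : Fin 13,
    ((PySem.List.pyRange 0 ((r : Nat) : Int) 1).map
        (fun i => if i < ((mi : Nat) : Int) then (11 : Int) - i
                  else if i = ((mi : Nat) : Int) then 0 else 12 - i)).sum =
      (11 * ((r : Nat) : Int) -
        PySem.Int.floordiv (((r : Nat) : Int) * (((r : Nat) : Int) - 1)) 2) +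
      (if ((mi : Nat) : Int) < ((r : Nat) : Int) then
          (((r : Nat) : Int) - 1 - ((mi : Nat) : Int)) - (11 - ((mi : Nat) : Int)) else 0) := by
  decide

-- ===== VERDICT (by name: the statement is the Claim_ definition above) =====
set_option maxHeartbeats 1000000 in
theorem is_quadr2double_spec : Claim_equal_is_quadr2double := by
  intro cl _hdom hpre
  unfold Spec_is_quadr2double
  rcases cl with _ | ⟨c0, _ | ⟨c1, _ | ⟨c2, _ | ⟨c3, _ | ⟨c4, _ | ⟨c5, _ | ⟨c6, _ | ⟨c7, _ | ⟨c8, rest⟩⟩⟩⟩⟩⟩⟩⟩⟩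
  all_goals try rfl
  unfold Pre_is_quadr2double at hpre
  have hb := hpre rfl
  simp only [preOk, List.getD, List.getElem?_cons_zero, List.getElem?_cons_succ, Option.getD_some,
    Bool.and_eq_true, Bool.or_eq_true, Bool.not_eq_eq_eq_not, Bool.not_true,
    Bool.and_eq_false_iff, beq_eq_false_iff_ne, Bool.not_false, beq_iff_eq,
    List.contains_eq_mem, decide_eq_true_eq] at hb
  have hp1 := hb.1.1
  have hp2 := hb.1.2
  have hp3 := hb.2
  by_cases h1 : c0 = c1 ∧ c1 = c2 ∧ c2 = c3 ∧ c4 = c5 ∧ c0 ≠ c4 ∧ c6 = c7 ∧ c0 ≠ c6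
  · rcases hp1 with hL | ⟨⟨m0, m6⟩, m4⟩
    · exfalso; obtain ⟨e1, e2, e3, e4, n1, e5, n2⟩ := h1
      rcases hL with ((((((h | h) | h) | h) | h) | h) | h) <;> contradiction
    obtain ⟨im, himA, himB⟩ := rank_lookup _ m0
    obtain ⟨i1, hi1A, hi1B⟩ := rank_lookup _ m6
    obtain ⟨i2, hi2A, hi2B⟩ := rank_lookup _ m4
    simp only [is_quadr2double, is_quadr2double_alt, List.length_cons, List.length_nil,
      Nat.reduceAdd, ne_eq, not_true_eq_false, if_false, List.getD, List.getElem?_cons_zero,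
      List.getElem?_cons_succ, Option.getD_some, quadTail, if_pos h1,
      himA, himB, hi1A, hi1B, hi2A, hi2B]
    rw [PySem.List.foldl_add _ (fun i => (11 : Int) - i), sum_plain i1, Prod.mk.injEq]
    exact ⟨by ring, rfl⟩
  · by_cases h2 : c2 = c3 ∧ c3 = c4 ∧ c4 = c5 ∧ c0 = c1 ∧ c0 ≠ c2 ∧ c6 = c7 ∧ c6 ≠ c2 ∧ c0 ≠ c6
    · rcases hp2 with hL | ⟨⟨m2, m6⟩, m0⟩
      · exfalso; obtain ⟨e1, e2, e3, e4, n1, e5, n2, n3⟩ := h2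
        rcases hL with (((((((h | h) | h) | h) | h) | h) | h) | h) <;> contradiction
      obtain ⟨im, himA, himB⟩ := rank_lookup _ m2
      obtain ⟨i1, hi1A, hi1B⟩ := rank_lookup _ m6
      obtain ⟨i2, hi2A, hi2B⟩ := rank_lookup _ m0
      simp only [is_quadr2double, is_quadr2double_alt, List.length_cons, List.length_nil,
      Nat.reduceAdd, ne_eq, not_true_eq_false, if_false, List.getD, List.getElem?_cons_zero,
      List.getElem?_cons_succ, Option.getD_some, quadTail, if_neg h1, if_pos h2,
        himA, himB, hi1A, hi1B, hi2A, hi2B]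
      rw [PySem.List.foldl_add _ (fun i => (11 : Int) - i), sum_plain i1, Prod.mk.injEq]
      exact ⟨by ring, rfl⟩
    · by_cases h3 : c4 = c5 ∧ c5 = c6 ∧ c6 = c7 ∧ c0 = c1 ∧ c0 ≠ c4 ∧ c2 = c3 ∧ c2 ≠ c4 ∧ c0 ≠ c2
      · rcases hp3 with hL | ⟨⟨m4, m2⟩, m0⟩
        · exfalso; obtain ⟨e1, e2, e3, e4, n1, e5, n2, n3⟩ := h3
          rcases hL with (((((((h | h) | h) | h) | h) | h) | h) | h) <;> contradiction
        obtain ⟨im, himA, himB⟩ := rank_lookup _ m4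
        obtain ⟨i1, hi1A, hi1B⟩ := rank_lookup _ m2
        obtain ⟨i2, hi2A, hi2B⟩ := rank_lookup _ m0
        simp only [is_quadr2double, is_quadr2double_alt, List.length_cons, List.length_nil,
      Nat.reduceAdd, ne_eq, not_true_eq_false, if_false, List.getD, List.getElem?_cons_zero,
      List.getElem?_cons_succ, Option.getD_some, if_neg h1, if_neg h2, if_pos h3,
          himA, himB, hi1A, hi1B, hi2A, hi2B]
        have hb2 : (fun (acc i : Int) =>
              if i < ((im : Nat) : Int) then acc + (11 - i)
              else if i = ((im : Nat) : Int) then acc else acc + (12 - i)) =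
            fun (acc i : Int) => acc +
              (if i < ((im : Nat) : Int) then (11 : Int) - i
               else if i = ((im : Nat) : Int) then 0 else 12 - i) := by
          funext acc i; split_ifs <;> ring
        rw [hb2, PySem.List.foldl_add, sum_cond im i1, Prod.mk.injEq]
        refine ⟨?_, rfl⟩
        split_ifs <;> ring
      · simp only [is_quadr2double, is_quadr2double_alt, List.length_cons, List.length_nil,
          Nat.reduceAdd, ne_eq, not_true_eq_false, if_false, List.getD, List.getElem?_cons_zero,
          List.getElem?_cons_succ, Option.getD_some, if_neg h1, if_neg h2, if_neg h3]
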